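-- pv_equiv track=rewrite | github.com/in-fin-neat/in-fin-neat-core | custom_categories.py | _get_matching_categories
-- ===== SOURCE A (Python) =====
-- from typing import Dict, List, Optional
--
-- def _get_matching_categories(
--     reference: str, category_index: Dict[str, List]
-- ) -> List[str]:
--     matching_categories = set()
--     for reference_keyword, category in category_index.items():
--         if reference_keyword in reference:
--             matching_categories.add(category)
--
--     return matching_categories
-- ===== SOURCE B (Python) =====
-- def _get_matching_categories(reference, category_index):
--     # Collect every substring of `reference` whose length is a keyword length,
--     # then answer each keyword by one set lookup instead of scanning reference.
--     lengths = {len(keyword) for keyword in category_index}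
--     found = {reference[i:i + n] for i in range(len(reference) + 1) for n in lengths}
--     return {category for keyword, category in category_index.items() if keyword in found}
-- ===== Notes on version B (the rewrite author's own statement) =====
-- stated objective: faster
-- what changed: Instead of running a substring search over the whole reference for every keyword, B enumerates once the substrings of the reference at the keyword lengths into a hash set and answers each keyword by a single set lookup, removing the per-keyword scan of the reference.
import Mathlib
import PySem

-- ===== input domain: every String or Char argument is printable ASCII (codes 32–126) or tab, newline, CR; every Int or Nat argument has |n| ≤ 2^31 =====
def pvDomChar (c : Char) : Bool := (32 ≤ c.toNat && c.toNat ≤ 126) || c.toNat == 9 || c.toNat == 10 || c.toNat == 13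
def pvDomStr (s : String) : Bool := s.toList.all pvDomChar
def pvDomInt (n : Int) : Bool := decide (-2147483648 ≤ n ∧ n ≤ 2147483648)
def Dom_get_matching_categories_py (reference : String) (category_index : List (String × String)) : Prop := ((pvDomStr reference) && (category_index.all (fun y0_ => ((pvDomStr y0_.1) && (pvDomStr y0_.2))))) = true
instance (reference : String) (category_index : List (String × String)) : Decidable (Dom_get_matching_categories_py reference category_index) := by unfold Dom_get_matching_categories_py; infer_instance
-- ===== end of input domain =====

-- B replaces the per-keyword substring search over the reference by a set of the
-- reference's substrings at the keyword lengths (built once), then does one set lookup per keyword.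

-- ===== PORT A =====
-- for reference_keyword, category in category_index.items(): if reference_keyword in reference: matching_categories.add(category)
def get_matching_categories_py (reference : String) (category_index : List (String × String)) : List String :=
  category_index.foldl
    (fun matching_categories p =>
      if PySem.Str.isIn p.1 reference then PySem.Set.add matching_categories p.2
      else matching_categories)
    PySem.Set.empty

-- ===== PORT B =====
def get_matching_categories_py_alt (reference : String) (category_index : List (String × String)) : List String :=
  -- lengths = {len(keyword) for keyword in category_index}
  let lengths : PySem.Set Int := PySem.Set.ofList (category_index.map (fun p => PySem.Str.len p.1))
  -- found = {reference[i:i+n] for i in range(len(reference)+1) for n in lengths}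
  let found : PySem.Set String :=
    (PySem.List.pyRange 0 (PySem.Str.len reference + 1) 1).foldl
      (fun s i =>
        lengths.foldl (fun s n => PySem.Set.add s (PySem.Str.slice reference (some i) (some (i + n)))) s)
      PySem.Set.empty
  -- return {category for keyword, category in category_index.items() if keyword in found}
  PySem.Set.ofList ((category_index.filter (fun p => PySem.Set.contains found p.1)).map (fun p => p.2))

-- ===== PRECONDITION & SPEC =====
def Spec_get_matching_categories_py (reference : String) (category_index : List (String × String)) (out : List String) : Prop := out = get_matching_categories_py_alt reference category_index
instance (reference : String) (category_index : List (String × String)) (out : List String) : Decidable (Spec_get_matching_categories_py reference category_index out) := by unfold Spec_get_matching_categories_py; infer_instance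

-- ===== CLAIM (what is proved, stated in full; the proofs are below) =====
def Claim_equal_get_matching_categories_py : Prop := ∀ (reference : String) (category_index : List (String × String)), Dom_get_matching_categories_py reference category_index → Spec_get_matching_categories_py reference category_index (get_matching_categories_py reference category_index)

-- ===== LEMMAS AND PROOFS =====

-- membership in a fold of Set.add over generated elements
theorem pv_mem_foldl_add_iff {α β : Type} [BEq α] [LawfulBEq α]
    (l : List β) (f : β → α) (init : PySem.Set α) (x : α) :
    x ∈ l.foldl (fun s b => PySem.Set.add s (f b)) init ↔ x ∈ init ∨ ∃ b ∈ l, x = f b := by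
  induction l generalizing init with
  | nil => simp
  | cons hd tl ih =>
    simp only [List.foldl_cons, ih, PySem.Set.mem_add, List.mem_cons]
    constructor
    · rintro (( h | h ) | ⟨b, hb, rfl⟩)
      · exact Or.inl h
      · exact Or.inr ⟨hd, Or.inl rfl, h⟩
      · exact Or.inr ⟨b, Or.inr hb, rfl⟩
    · rintro (h | ⟨b, (rfl | hb), rfl⟩)
      · exact Or.inl (Or.inl h)
      · exact Or.inl (Or.inr rfl)
      · exact Or.inr ⟨b, hb, rfl⟩

-- membership in the nested fold building `found`
theorem pv_mem_nested_foldl_add_iff {α β γ : Type} [BEq α] [LawfulBEq α]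
    (outer : List β) (inner : List γ) (f : β → γ → α) (init : PySem.Set α) (x : α) :
    x ∈ outer.foldl (fun s i => inner.foldl (fun s n => PySem.Set.add s (f i n)) s) init ↔
      x ∈ init ∨ ∃ i ∈ outer, ∃ n ∈ inner, x = f i n := by
  induction outer generalizing init with
  | nil => simp
  | cons hd tl ih =>
    simp only [List.foldl_cons, ih, pv_mem_foldl_add_iff, List.mem_cons]
    constructor
    · rintro ((h | ⟨n, hn, rfl⟩) | ⟨i, hi, hn⟩)
      · exact Or.inl h
      · exact Or.inr ⟨hd, Or.inl rfl, n, hn, rfl⟩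
      · exact Or.inr ⟨i, Or.inr hi, hn⟩
    · rintro (h | ⟨i, (rfl | hi), hn⟩)
      · exact Or.inl (Or.inl h)
      · exact Or.inl (Or.inr hn)
      · exact Or.inr ⟨i, hi, hn⟩

-- a take-of-drop is an infix
theorem pv_take_drop_infix {α : Type} (xs : List α) (a b : Nat) :
    (xs.drop a).take b <:+: xs :=
  (List.take_prefix b (xs.drop a)).isInfix.trans (List.drop_suffix a xs).isInfix

-- the crux: a keyword's membership in `found` is exactly the substring test of A
theorem pv_contains_found_eq (reference : String) (category_index : List (String × String))
    (p : String × String) (hp : p ∈ category_index) :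
    PySem.Set.contains
      ((PySem.List.pyRange 0 (PySem.Str.len reference + 1) 1).foldl
        (fun s i =>
          (PySem.Set.ofList (category_index.map (fun q => PySem.Str.len q.1))).foldl
            (fun s n => PySem.Set.add s (PySem.Str.slice reference (some i) (some (i + n)))) s)
        PySem.Set.empty) p.1
      = PySem.Str.isIn p.1 reference := by
  have hlen : PySem.Str.len p.1 ∈ PySem.Set.ofList (category_index.map (fun q => PySem.Str.len q.1)) := by
    rw [PySem.Set.mem_ofList]
    exact List.mem_map.mpr ⟨p, hp, rfl⟩
  by_cases h : PySem.Str.isIn p.1 reference = true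
  · rw [h, PySem.Set.contains_iff, pv_mem_nested_foldl_add_iff]
    -- A finds the keyword: produce the slice that equals it
    have h' : PySem.Chars.isIn p.1.toList reference.toList = true := by
      simpa using h
    obtain ⟨j, hj⟩ := (PySem.Chars.exists_prefix_drop_iff_isIn p.1.toList reference.toList).mpr h'
    set L := reference.toList.length with hL
    have hdrop : p.1.toList <+: reference.toList.drop (min j L) := by
      rcases Nat.le_total j L with hle | hge
      · simpa [Nat.min_eq_left hle] using hj
      · have : reference.toList.drop j = [] := List.drop_eq_nil_of_le (by omega)
        have hnil : p.1.toList = [] := List.prefix_nil.mp (this ▸ hj)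
        simp [hnil]
    refine Or.inr ⟨((min j L : Nat) : Int), ?_, PySem.Str.len p.1, hlen, ?_⟩
    · rw [PySem.List.mem_pyRange_one]
      constructor
      · positivity
      · have : min j L ≤ L := Nat.min_le_right _ _
        simp only [PySem.Str.len_eq, hL]
        omega
    · -- p.1 = reference[i : i + len(p.1)]
      have htake : p.1.toList = (reference.toList.drop (min j L)).take p.1.toList.length :=
        List.prefix_iff_eq_take.mp hdrop
      apply String.ext
      rw [PySem.Str.toList_slice]
      have : PySem.Str.len p.1 = ((p.1.toList.length : Nat) : Int) := by simp
      rw [this]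
      simp only [PySem.Chars.slice_eq_listSlice, PySem.List.slice_natCast_add]
      exact htake
  · rw [Bool.not_eq_true] at h
    rw [h]
    rw [Bool.eq_false_iff]
    intro hc
    rw [PySem.Set.contains_iff, pv_mem_nested_foldl_add_iff] at hc
    rcases hc with hc | ⟨i, hi, n, hn, heq⟩
    · simp [PySem.Set.empty] at hc
    · -- every element of found is a substring of reference, contradiction with h
      rw [PySem.List.mem_pyRange_one] at hi
      obtain ⟨hi0, _⟩ := hi
      have hn0 : 0 ≤ n := by
        rw [PySem.Set.mem_ofList, List.mem_map] at hn
        obtain ⟨q, _, rfl⟩ := hn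
        simp
      have hinfix : p.1.toList <:+: reference.toList := by
        rw [heq, PySem.Str.toList_slice]
        simp only [PySem.Chars.slice_eq_listSlice]
        rw [PySem.List.slice_toNat _ hi0 (by omega : (0:Int) ≤ i + n)]
        exact pv_take_drop_infix _ _ _
      have := (PySem.Chars.isIn_iff_infix p.1.toList reference.toList).mpr hinfix
      have h' : PySem.Chars.isIn p.1.toList reference.toList = false := by
        simpa using h
      rw [h'] at this
      exact absurd this (by simp)

-- ===== VERDICT (by name: the statement is the Claim_ definition above) =====
theorem get_matching_categories_py_spec : Claim_equal_get_matching_categories_py := by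
  intro reference category_index _
  unfold Spec_get_matching_categories_py get_matching_categories_py get_matching_categories_py_alt
  simp only []
  rw [PySem.Set.ofList_eq_foldl, List.foldl_map,
      ← PySem.List.foldl_if_eq_foldl_filter (fun p => PySem.Set.contains _ p.1)
        (fun s (p : String × String) => PySem.Set.add s p.2)]
  exact PySem.List.foldl_congr_mem _ _ _ _ (fun acc x hx => by
    rw [pv_contains_found_eq reference category_index x hx])
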